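-- pv_equiv track=rewrite | github.com/Dor-sketch/audio-visual-synth | AudioVisualSynth/main.py | calculate_key_positions
-- ===== SOURCE A (Python) =====
-- note_to_color = {
--     48: (0, 0, 255), 49: (0, 100, 255), 50: (0, 200, 255), 51: (0, 255, 200),
--     52: (0, 255, 100), 53: (0, 255, 0), 54: (100, 255, 0), 55: (200, 255, 0),
--     56: (255, 200, 0), 57: (255, 100, 0), 58: (255, 0, 0), 59: (255, 0, 100),
--     60: (0, 0, 255), 61: (0, 100, 255), 62: (0, 200, 255), 63: (0, 255, 200),
--     64: (0, 255, 100), 65: (0, 255, 0), 66: (100, 255, 0), 67: (200, 255, 0),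
--     68: (255, 200, 0), 69: (255, 100, 0), 70: (255, 0, 0), 71: (255, 0, 100),
--     72: (255, 0, 200), 73: (255, 0, 255), 74: (200, 0, 255), 75: (100, 0, 255),
--     76: (0, 0, 255), 77: (0, 100, 255), 78: (0, 200, 255), 79: (0, 255, 200),
--     80: (0, 255, 100)
-- }
--
-- def calculate_key_positions(display_width, display_height, note_to_color=note_to_color):
--     key_positions = {}
--     white_keys = [note for note in note_to_color if note % 12 in [0, 2, 4, 5, 7, 9, 11]]
--     white_key_width = display_width // len(white_keys)
--     black_key_width = int(white_key_width * 0.6)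
--     black_key_height = 100
--
--     white_key_index = 0
--     for note in sorted(note_to_color.keys()):
--         if note % 12 in [0, 2, 4, 5, 7, 9, 11]:
--             x = white_key_index * white_key_width
--             key_positions[note] = (x + white_key_width // 2, display_height - 150)
--             white_key_index += 1
--         elif note % 12 in [1, 3, 6, 8, 10]:
--             # Position black keys between the white keys, without extra space
--             prev_white_key_x = (white_key_index - 1) * white_key_width
--             x = prev_white_key_x + (white_key_width - black_key_width // 2)
--             key_positions[note] = (x, display_height - 150 - black_key_height)
--
--     return key_positions
-- ===== SOURCE B (Python) =====
-- note_to_color = {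
--     48: (0, 0, 255), 49: (0, 100, 255), 50: (0, 200, 255), 51: (0, 255, 200),
--     52: (0, 255, 100), 53: (0, 255, 0), 54: (100, 255, 0), 55: (200, 255, 0),
--     56: (255, 200, 0), 57: (255, 100, 0), 58: (255, 0, 0), 59: (255, 0, 100),
--     60: (0, 0, 255), 61: (0, 100, 255), 62: (0, 200, 255), 63: (0, 255, 200),
--     64: (0, 255, 100), 65: (0, 255, 0), 66: (100, 255, 0), 67: (200, 255, 0),
--     68: (255, 200, 0), 69: (255, 100, 0), 70: (255, 0, 0), 71: (255, 0, 100),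
--     72: (255, 0, 200), 73: (255, 0, 255), 74: (200, 0, 255), 75: (100, 0, 255),
--     76: (0, 0, 255), 77: (0, 100, 255), 78: (0, 200, 255), 79: (0, 255, 200),
--     80: (0, 255, 100)
-- }
--
-- WHITE = {0, 2, 4, 5, 7, 9, 11}
--
-- def calculate_key_positions(display_width, display_height, note_to_color=note_to_color):
--     # Two-pass, stateless: positions are a pure function of each note's
--     # "white rank" = number of white keys strictly below it.
--     notes = sorted(note_to_color)
--     whites = [n for n in notes if n % 12 in WHITE]
--     white_key_width = display_width // len(whites)
--     black_key_width = int(white_key_width * 0.6)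
--
--     def rank(x):
--         # index of the first white >= x  ==  number of whites strictly below x
--         lo, hi = 0, len(whites)
--         while lo < hi:
--             mid = (lo + hi) // 2
--             if whites[mid] < x:
--                 lo = mid + 1
--             else:
--                 hi = mid
--         return lo
--
--     def pos(n):
--         r = rank(n)
--         if n % 12 in WHITE:
--             return (r * white_key_width + white_key_width // 2, display_height - 150)
--         return ((r - 1) * white_key_width + (white_key_width - black_key_width // 2),
--                 display_height - 250)
--
--     return {n: pos(n) for n in notes}
-- ===== Notes on version B (the rewrite author's own statement) =====
-- stated objective: alternative
-- what changed: A assigns positions in one stateful pass over the sorted notes with a running white-key counter; B is stateless and two-pass: it builds the sorted white-key list once and then maps each note independently to its position, computing its white rank (number of white keys strictly below it) by a hand-written binary search.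
import Mathlib
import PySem

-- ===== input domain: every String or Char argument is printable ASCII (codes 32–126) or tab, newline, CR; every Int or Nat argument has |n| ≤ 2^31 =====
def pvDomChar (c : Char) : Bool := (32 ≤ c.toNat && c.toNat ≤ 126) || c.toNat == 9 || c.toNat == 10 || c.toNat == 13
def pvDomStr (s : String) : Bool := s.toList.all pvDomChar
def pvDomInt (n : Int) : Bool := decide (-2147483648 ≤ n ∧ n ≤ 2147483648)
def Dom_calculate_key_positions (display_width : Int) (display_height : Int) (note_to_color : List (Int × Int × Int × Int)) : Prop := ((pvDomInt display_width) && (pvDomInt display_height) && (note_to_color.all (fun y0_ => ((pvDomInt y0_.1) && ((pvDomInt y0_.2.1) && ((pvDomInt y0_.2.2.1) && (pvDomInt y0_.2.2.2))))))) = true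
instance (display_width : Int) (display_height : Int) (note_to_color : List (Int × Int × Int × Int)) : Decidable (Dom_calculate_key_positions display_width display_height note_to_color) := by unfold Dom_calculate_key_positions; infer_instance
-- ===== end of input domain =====

-- B replaces A's stateful counter pass by a stateless two-pass version: each note's position is computed independently from its white rank, found by binary search (same cost class).

-- note % 12 in [0, 2, 4, 5, 7, 9, 11]
def pvWhite (n : Int) : Bool := [(0:Int), 2, 4, 5, 7, 9, 11].contains (PySem.Int.mod n 12)
-- note % 12 in [1, 3, 6, 8, 10]
def pvBlack (n : Int) : Bool := [(1:Int), 3, 6, 8, 10].contains (PySem.Int.mod n 12)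

-- int(w * 0.6): exact transliteration on the stated domain |w| ≤ 2^31. 0.6's double is
-- 3/5 - 1/(5·2^53); for |w| ≤ 2^31 the rounded product w*0.6 truncates (toward zero, as
-- Python's int() does) to exactly trunc(3w/5), since the rounding error stays strictly
-- below the distance to the next integer boundary.
def pvMul06Trunc (w : Int) : Int := if 0 ≤ w then (3 * w) / 5 else -((3 * (-w)) / 5)

-- ===== PORT A =====
def calculate_key_positions (display_width : Int) (display_height : Int) (note_to_color : List (Int × Int × Int × Int)) : List (Int × Int × Int) :=
  let keys := PySem.List.dedup (note_to_color.map (·.1))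
  let white_keys := keys.filter pvWhite
  let white_key_width := PySem.Int.floordiv display_width (white_keys.length : Int)
  let black_key_width := pvMul06Trunc white_key_width
  let black_key_height : Int := 100
  let res := (PySem.List.sorted keys (fun x => x) false).foldl
    (fun (st : Int × PySem.Dict Int (Int × Int)) note =>
      if pvWhite note then
        let x := st.1 * white_key_width
        (st.1 + 1, st.2.insert note (x + PySem.Int.floordiv white_key_width 2, display_height - 150))
      else if pvBlack note then
        let prev_white_key_x := (st.1 - 1) * white_key_width
        let x := prev_white_key_x + (white_key_width - PySem.Int.floordiv black_key_width 2)
        (st.1, st.2.insert note (x, display_height - 150 - black_key_height))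
      else st) ((0 : Int), PySem.Dict.empty)
  res.2.items

-- ===== PORT B =====
-- Source B's hand-written binary search 'rank': index of the first a[i] >= x on [lo, hi).
-- a[mid] is always in range when called with hi ≤ a.length (the while-loop invariant),
-- so '(pyGet? …).getD 0' is exact there.
def pvBisect (a : List Int) (x : Int) (lo hi : Nat) : Nat :=
  if lo < hi then
    let mid := (lo + hi) / 2
    if (PySem.List.pyGet? a (mid : Int)).getD 0 < x then pvBisect a x (mid + 1) hi
    else pvBisect a x lo mid
  else lo
termination_by hi - lo
decreasing_by all_goals omega

def calculate_key_positions_alt (display_width : Int) (display_height : Int) (note_to_color : List (Int × Int × Int × Int)) : List (Int × Int × Int) :=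
  let notes := PySem.List.sorted (PySem.List.dedup (note_to_color.map (·.1))) (fun x => x) false
  let whites := notes.filter pvWhite
  let white_key_width := PySem.Int.floordiv display_width (whites.length : Int)
  let black_key_width := pvMul06Trunc white_key_width
  notes.map (fun n =>
    let r : Int := ((pvBisect whites n 0 whites.length : Nat) : Int)
    if pvWhite n then
      (n, r * white_key_width + PySem.Int.floordiv white_key_width 2, display_height - 150)
    else
      (n, (r - 1) * white_key_width + (white_key_width - PySem.Int.floordiv black_key_width 2),
       display_height - 250))

-- ===== PRECONDITION & SPEC =====
-- Pre_ excludes exactly the inputs with no white-residue key, where Python A (and B) raise ZeroDivisionError.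
def Pre_calculate_key_positions (display_width : Int) (display_height : Int) (note_to_color : List (Int × Int × Int × Int)) : Prop :=
  ∃ p ∈ note_to_color, pvWhite p.1 = true
instance (display_width : Int) (display_height : Int) (note_to_color : List (Int × Int × Int × Int)) : Decidable (Pre_calculate_key_positions display_width display_height note_to_color) := by unfold Pre_calculate_key_positions; infer_instance

def pvWitness_calculate_key_positions : Int × Int × (List (Int × Int × Int × Int)) :=
  (700, 500, [(60, 255, 0, 0), (61, 0, 255, 0), (62, 0, 0, 255)])

def Spec_calculate_key_positions (display_width : Int) (display_height : Int) (note_to_color : List (Int × Int × Int × Int)) (out : List (Int × Int × Int)) : Prop := out = calculate_key_positions_alt display_width display_height note_to_color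
instance (display_width : Int) (display_height : Int) (note_to_color : List (Int × Int × Int × Int)) (out : List (Int × Int × Int)) : Decidable (Spec_calculate_key_positions display_width display_height note_to_color out) := by unfold Spec_calculate_key_positions; infer_instance

-- ===== CLAIM (what is proved, stated in full; the proofs are below) =====
def Claim_equal_calculate_key_positions : Prop := ∀ (display_width : Int) (display_height : Int) (note_to_color : List (Int × Int × Int × Int)), Dom_calculate_key_positions display_width display_height note_to_color → Pre_calculate_key_positions display_width display_height note_to_color → Spec_calculate_key_positions display_width display_height note_to_color (calculate_key_positions display_width display_height note_to_color)

-- ===== LEMMAS AND PROOFS =====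

lemma pvBlack_of_not_white {n : Int} (h : pvWhite n = false) : pvBlack n = true := by
  have h0 : 0 ≤ PySem.Int.mod n 12 := PySem.Int.mod_nonneg n (by norm_num)
  have h1 : PySem.Int.mod n 12 < 12 := PySem.Int.mod_lt n (by norm_num)
  simp only [pvWhite, pvBlack, List.contains_eq_mem, decide_eq_false_iff_not, decide_eq_true_iff,
    List.mem_cons, List.not_mem_nil, or_false] at h ⊢
  omega

-- A's loop over a strictly increasing list of fresh keys equals B's rank-based map,
-- provided the counter i agrees with the rank function r on every remaining note.
lemma pvLoopA (w bw dh : Int) (r : Int → Int) :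
    ∀ (l : List Int) (i : Int) (d : PySem.Dict Int (Int × Int)),
      l.Pairwise (· < ·) →
      (∀ n ∈ l, d.contains n = false) →
      (∀ n ∈ l, r n = i + ((l.filter (fun m => pvWhite m && decide (m < n))).length : Int)) →
      (l.foldl (fun (st : Int × PySem.Dict Int (Int × Int)) note =>
          if pvWhite note then
            (st.1 + 1, st.2.insert note (st.1 * w + PySem.Int.floordiv w 2, dh - 150))
          else if pvBlack note then
            (st.1, st.2.insert note ((st.1 - 1) * w + (w - PySem.Int.floordiv bw 2), dh - 150 - 100))
          else st) (i, d)).2.items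
      = d.items ++ l.map (fun n =>
          if pvWhite n then
            (n, r n * w + PySem.Int.floordiv w 2, dh - 150)
          else
            (n, (r n - 1) * w + (w - PySem.Int.floordiv bw 2), dh - 250)) := by
  intro l
  induction l with
  | nil => intro i d _ _ _; simp
  | cons a t ih =>
    intro i d hsort hfresh hrank
    have hat : ∀ m ∈ t, a < m := fun m hm => (List.pairwise_cons.mp hsort).1 m hm
    have htsort : t.Pairwise (· < ·) := (List.pairwise_cons.mp hsort).2
    have hra : r a = i := by
      have := hrank a (List.mem_cons_self ..)
      have hz : (a :: t).filter (fun m => pvWhite m && decide (m < a)) = [] := by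
        apply List.filter_eq_nil_iff.mpr
        intro m hm
        rcases List.mem_cons.mp hm with hma | hmt
        · subst hma; simp
        · have := hat m hmt; simp; intro _; omega
      rw [hz] at this; simpa using this
    have hfilter : ∀ n ∈ t,
        ((a :: t).filter (fun m => pvWhite m && decide (m < n))).length
        = (if pvWhite a then 1 else 0) + (t.filter (fun m => pvWhite m && decide (m < n))).length := by
      intro n hn
      have han : a < n := hat n hn
      by_cases hw : pvWhite a
      · simp [hw, han]; omega
      · simp [hw]
    by_cases hw : pvWhite a
    · -- white head
      simp only [List.foldl_cons, hw, if_true]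
      rw [ih (i + 1) (d.insert a (i * w + PySem.Int.floordiv w 2, dh - 150)) htsort
          (by
            intro n hn
            have hne : n ≠ a := by have := hat n hn; omega
            rw [PySem.Dict.contains_insert]
            simp [hne, hfresh n (List.mem_cons_of_mem a hn)])
          (by
            intro n hn
            have := hrank n (List.mem_cons_of_mem a hn)
            rw [this]
            have := hfilter n hn
            simp [hw] at this
            push_cast [this]
            ring)]
      have hfa : d.contains a = false := hfresh a (List.mem_cons_self ..)
      rw [PySem.Dict.items_insert_of_not_contains _ _ hfa]
      simp [hw, hra, List.append_assoc]
    · -- black head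
      have hb : pvBlack a = true := pvBlack_of_not_white (by simpa using hw)
      simp only [List.foldl_cons, hw, hb, if_false, if_true, Bool.false_eq_true]
      rw [ih i (d.insert a ((i - 1) * w + (w - PySem.Int.floordiv bw 2), dh - 150 - 100)) htsort
          (by
            intro n hn
            have hne : n ≠ a := by have := hat n hn; omega
            rw [PySem.Dict.contains_insert]
            simp [hne, hfresh n (List.mem_cons_of_mem a hn)])
          (by
            intro n hn
            have := hrank n (List.mem_cons_of_mem a hn)
            rw [this, hfilter n hn]
            simp [hw])]
      have hfa : d.contains a = false := hfresh a (List.mem_cons_self ..)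
      rw [PySem.Dict.items_insert_of_not_contains _ _ hfa]
      have : dh - 150 - 100 = dh - 250 := by ring
      simp [hw, hra, this, List.append_assoc]

-- countP of a predicate that holds exactly below index lo
lemma pvCountP_split (x : Int) :
    ∀ (a : List Int) (lo : Nat), lo ≤ a.length →
      (∀ j (hj : j < a.length), j < lo → a[j] < x) →
      (∀ j (hj : j < a.length), lo ≤ j → ¬ a[j] < x) →
      a.countP (fun m => decide (m < x)) = lo := by
  intro a
  induction a with
  | nil => intro lo h _ _; simpa using (h.antisymm (Nat.zero_le _)).symm
  | cons b t ih =>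
    intro lo hlo h1 h2
    cases lo with
    | zero =>
      rw [List.countP_eq_zero.mpr]
      intro m hm
      obtain ⟨j, hj, rfl⟩ := List.mem_iff_getElem.mp hm
      simpa using h2 j hj (Nat.zero_le _)
    | succ l =>
      have hb : b < x := by simpa using h1 0 (by simp) (Nat.succ_pos _)
      rw [List.countP_cons_of_pos (by simpa using hb),
          ih l (by simpa using hlo)
            (fun j hj hjl => by simpa using h1 (j + 1) (by simpa using hj) (by omega))
            (fun j hj hjl => by simpa using h2 (j + 1) (by simpa using hj) (by omega))]

-- the binary search computes the number of elements < x in a sorted list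
lemma pvBisect_inv (a : List Int) (x : Int) (hs : a.Pairwise (· ≤ ·)) :
    ∀ (k lo hi : Nat), hi - lo ≤ k → lo ≤ hi → hi ≤ a.length →
      (∀ j (hj : j < a.length), j < lo → a[j] < x) →
      (∀ j (hj : j < a.length), hi ≤ j → ¬ a[j] < x) →
      pvBisect a x lo hi = a.countP (fun m => decide (m < x)) := by
  have hmono := List.pairwise_iff_getElem.mp hs
  intro k
  induction k with
  | zero =>
    intro lo hi hk hlh hhl h1 h2
    have : lo = hi := by omega
    subst this
    rw [pvBisect, if_neg (by omega)]
    exact (pvCountP_split x a lo hhl h1 (fun j hj hjl => h2 j hj hjl)).symm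
  | succ k ih =>
    intro lo hi hk hlh hhl h1 h2
    by_cases hlt : lo < hi
    · rw [pvBisect, if_pos hlt]
      have hmid : (lo + hi) / 2 < hi ∧ lo ≤ (lo + hi) / 2 := by omega
      have hmr : (lo + hi) / 2 < a.length := by omega
      have hget : (PySem.List.pyGet? a (((lo + hi) / 2 : Nat) : Int)).getD 0
          = a[(lo + hi) / 2] := by
        rw [PySem.List.pyGet?_natCast, List.getElem?_eq_getElem hmr, Option.getD_some]
      simp only [hget]
      split_ifs with hc
      · exact ih ((lo + hi) / 2 + 1) hi (by omega) (by omega) hhl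
          (fun j hj hjl => by
            by_cases hjlo : j < lo
            · exact h1 j hj hjlo
            · have hle : a[j] ≤ a[(lo + hi) / 2] := by
                rcases Nat.lt_or_ge j ((lo + hi) / 2) with h | h
                · exact hmono j _ hj hmr h
                · have : j = (lo + hi) / 2 := by omega
                  subst this; exact le_refl _
              exact lt_of_le_of_lt hle hc)
          h2
      · exact ih lo ((lo + hi) / 2) (by omega) (by omega) (by omega) h1
          (fun j hj hjl => by
            have hxm : x ≤ a[(lo + hi) / 2] := le_of_not_gt hc
            have hle : a[(lo + hi) / 2] ≤ a[j] := by
              rcases Nat.lt_or_ge ((lo + hi) / 2) j with h | h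
              · exact hmono _ j hmr hj h
              · have : j = (lo + hi) / 2 := by omega
                subst this; exact le_refl _
            omega)
    · rw [pvBisect, if_neg hlt]
      have : lo = hi := by omega
      subst this
      exact (pvCountP_split x a lo hhl h1 (fun j hj hjl => h2 j hj hjl)).symm

lemma pvBisect_count (a : List Int) (x : Int) (hs : a.Pairwise (· ≤ ·)) :
    pvBisect a x 0 a.length = a.countP (fun m => decide (m < x)) :=
  pvBisect_inv a x hs a.length 0 a.length (by omega) (Nat.zero_le _) (le_refl _)
    (fun j _ h => absurd h (Nat.not_lt_zero j)) (fun j hj h => absurd hj (by omega))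

-- ===== VERDICT (by name: the statement is the Claim_ definition above) =====
theorem calculate_key_positions_spec : Claim_equal_calculate_key_positions := by
  intro dw dh ntc _ _
  unfold Spec_calculate_key_positions calculate_key_positions calculate_key_positions_alt
  set keys := PySem.List.dedup (ntc.map (·.1)) with hkeys
  set notes := PySem.List.sorted keys (fun x => x) false with hnotes
  have hperm : notes.Perm keys := PySem.List.sorted_perm ..
  have hlen : (notes.filter pvWhite).length = (keys.filter pvWhite).length :=
    (hperm.filter _).length_eq
  have hsort : notes.Pairwise (· < ·) := by
    rw [hnotes, hkeys, PySem.List.dedup_eq_ofList]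
    exact PySem.List.sorted_ofList_pairwise_lt _
  set whites := notes.filter pvWhite with hwhites
  set w := PySem.Int.floordiv dw ((keys.filter pvWhite).length : Int) with hw
  have hwsorted : whites.Pairwise (· ≤ ·) :=
    (List.Pairwise.filter pvWhite hsort).imp (fun h => le_of_lt h)
  rw [pvLoopA w (pvMul06Trunc w) dh
      (fun n => ((pvBisect whites n 0 whites.length : Nat) : Int)) notes 0
      PySem.Dict.empty hsort
      (by intro n _; exact PySem.Dict.contains_empty n)
      (by
        intro n _
        beta_reduce
        rw [pvBisect_count whites n hwsorted, List.countP_eq_length_filter]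
        simp only [hwhites, List.filter_filter, zero_add]
        norm_cast
        congr 1
        exact List.filter_congr (fun m _ => by simp [Bool.and_comm]))]
  have hlen' : (List.filter pvWhite notes).length = (List.filter pvWhite keys).length :=
    (hperm.filter _).length_eq
  simp only [hlen']
  rw [show (PySem.Dict.empty : PySem.Dict Int (Int × Int)).items = [] from rfl, List.nil_append]
  simp only [← hlen']
  rw [show w = PySem.Int.floordiv dw ((List.filter pvWhite notes).length : Int) from by
    rw [hw, ← hlen']]
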